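-- pv_equiv track=rewrite | github.com/grey8-io/learn-ai-with-grey8 | curriculum/phase-12-capstone/lesson-01-project-planning/exercises/ex-01/solution/main.py | select_project
-- ===== SOURCE A (Python) =====
-- CAPSTONE_PROJECTS = [
--     {"id": 1, "name": "AI Flashcard Generator", "level": "beginner", "tags": ["education", "cli", "llm"]},
--     {"id": 2, "name": "Mood Journal with AI Insights", "level": "beginner", "tags": ["health", "journal", "llm"]},
--     {"id": 3, "name": "Recipe Generator", "level": "beginner", "tags": ["food", "cli", "llm"]},
--     {"id": 4, "name": "Daily Standup Bot", "level": "beginner", "tags": ["productivity", "cli", "llm"]},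
--     {"id": 5, "name": "Code Comment Generator", "level": "beginner", "tags": ["code", "cli", "llm"]},
--     {"id": 6, "name": "Personal Knowledge Base", "level": "intermediate", "tags": ["rag", "search", "web"]},
--     {"id": 7, "name": "AI Meeting Summarizer", "level": "intermediate", "tags": ["productivity", "summarization", "web"]},
--     {"id": 8, "name": "Smart Email Drafter", "level": "intermediate", "tags": ["productivity", "writing", "web"]},
--     {"id": 9, "name": "Documentation Generator", "level": "intermediate", "tags": ["code", "writing", "cli"]},
--     {"id": 10, "name": "Interview Prep Coach", "level": "intermediate", "tags": ["education", "chat", "web"]},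
--     {"id": 11, "name": "Multi-Agent Research Assistant", "level": "advanced", "tags": ["agents", "research", "rag"]},
--     {"id": 12, "name": "AI-Powered Code Reviewer", "level": "advanced", "tags": ["code", "agents", "web"]},
--     {"id": 13, "name": "Custom Chatbot Platform", "level": "advanced", "tags": ["chat", "rag", "web", "deployment"]},
--     {"id": 14, "name": "AI Content Pipeline", "level": "advanced", "tags": ["agents", "writing", "automation"]},
--     {"id": 15, "name": "Local AI Development Environment", "level": "advanced", "tags": ["code", "agents", "tools"]},
-- ]
--
-- def select_project(interests: list[str], skill_level: str) -> list[dict]: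
--     """Recommend top 3 capstone projects based on interests and skill level."""
--     level_filter = {
--         "beginner": ["beginner"],
--         "intermediate": ["beginner", "intermediate"],
--         "advanced": ["beginner", "intermediate", "advanced"],
--     }
--
--     allowed_levels = level_filter.get(skill_level, ["beginner"])
--
--     scored = []
--     for project in CAPSTONE_PROJECTS:
--         if project["level"] not in allowed_levels:
--             continue
--
--         matching_tags = [tag for tag in project["tags"] if tag in interests]
--         score = len(matching_tags)
--
--         if score > 0:
--             scored.append({
--                 "name": project["name"],
--                 "level": project["level"],
--                 "score": score,
--                 "reason": f"Matches your interests: {', '.join(matching_tags)}",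
--             })
--
--     scored.sort(key=lambda x: x["score"], reverse=True)
--
--     return [
--         {"name": s["name"], "level": s["level"], "reason": s["reason"]}
--         for s in scored[:3]
--     ]
-- ===== SOURCE B (Python) =====
-- CAPSTONE_PROJECTS = [
--     {"id": 1, "name": "AI Flashcard Generator", "level": "beginner", "tags": ["education", "cli", "llm"]},
--     {"id": 2, "name": "Mood Journal with AI Insights", "level": "beginner", "tags": ["health", "journal", "llm"]},
--     {"id": 3, "name": "Recipe Generator", "level": "beginner", "tags": ["food", "cli", "llm"]},
--     {"id": 4, "name": "Daily Standup Bot", "level": "beginner", "tags": ["productivity", "cli", "llm"]},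
--     {"id": 5, "name": "Code Comment Generator", "level": "beginner", "tags": ["code", "cli", "llm"]},
--     {"id": 6, "name": "Personal Knowledge Base", "level": "intermediate", "tags": ["rag", "search", "web"]},
--     {"id": 7, "name": "AI Meeting Summarizer", "level": "intermediate", "tags": ["productivity", "summarization", "web"]},
--     {"id": 8, "name": "Smart Email Drafter", "level": "intermediate", "tags": ["productivity", "writing", "web"]},
--     {"id": 9, "name": "Documentation Generator", "level": "intermediate", "tags": ["code", "writing", "cli"]},
--     {"id": 10, "name": "Interview Prep Coach", "level": "intermediate", "tags": ["education", "chat", "web"]},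
--     {"id": 11, "name": "Multi-Agent Research Assistant", "level": "advanced", "tags": ["agents", "research", "rag"]},
--     {"id": 12, "name": "AI-Powered Code Reviewer", "level": "advanced", "tags": ["code", "agents", "web"]},
--     {"id": 13, "name": "Custom Chatbot Platform", "level": "advanced", "tags": ["chat", "rag", "web", "deployment"]},
--     {"id": 14, "name": "AI Content Pipeline", "level": "advanced", "tags": ["agents", "writing", "automation"]},
--     {"id": 15, "name": "Local AI Development Environment", "level": "advanced", "tags": ["code", "agents", "tools"]},
-- ]
--
--
-- def select_project(interests: list[str], skill_level: str) -> list[dict]: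
--     """Recommend top 3 capstone projects based on interests and skill level.
--
--     Declarative pipeline instead of A's accumulator loop and sort: build the
--     scored rows with comprehensions (filter -> map -> filter), then lay the
--     rows out score-bucket by score-bucket from 4 (the largest tag list) down
--     to 1 with one nested comprehension -- which is exactly the stable
--     descending order -- and keep the first three.
--     """
--     if skill_level == "advanced":
--         allowed = ["beginner", "intermediate", "advanced"]
--     elif skill_level == "intermediate":
--         allowed = ["beginner", "intermediate"]
--     else:
--         allowed = ["beginner"]
--
--     def row(p):
--         tags = [t for t in p["tags"] if t in interests]
--         return (p["name"], p["level"], len(tags),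
--                 "Matches your interests: " + ", ".join(tags))
--
--     rows = [row(p) for p in CAPSTONE_PROJECTS if p["level"] in allowed]
--     rows = [r for r in rows if r[2] > 0]
--     ordered = [r for want in (4, 3, 2, 1) for r in rows if r[2] == want]
--     return [{"name": n, "level": lv, "reason": why}
--             for n, lv, _, why in ordered[:3]]
-- ===== Notes on version B (the rewrite author's own statement) =====
-- stated objective: alternative
-- what changed: B replaces A's accumulator loop and stable descending sort by a declarative pipeline: rows are built with filter/map/filter comprehensions and then laid out score-bucket by score-bucket from 4 down to 1 (the stable descending order) with a nested comprehension, taking the first three; the level filter is an if/elif chain instead of a dict lookup.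
import Mathlib
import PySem

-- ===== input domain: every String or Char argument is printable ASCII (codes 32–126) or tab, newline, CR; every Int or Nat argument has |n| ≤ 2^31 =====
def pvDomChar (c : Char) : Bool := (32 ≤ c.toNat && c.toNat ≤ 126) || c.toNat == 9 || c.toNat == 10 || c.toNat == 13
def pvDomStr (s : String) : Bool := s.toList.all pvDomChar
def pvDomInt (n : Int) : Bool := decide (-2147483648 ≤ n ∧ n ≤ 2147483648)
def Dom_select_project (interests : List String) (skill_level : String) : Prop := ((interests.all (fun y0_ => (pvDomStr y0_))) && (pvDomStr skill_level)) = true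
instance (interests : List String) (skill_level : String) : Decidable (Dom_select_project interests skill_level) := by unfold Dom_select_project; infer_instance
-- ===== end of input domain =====

-- B replaces A's accumulator loop + stable descending sort by a filter/map/filter pipeline
-- and a score-bucket sweep from 4 down to 1; objective: alternative (no sort).

-- ===== PORT A =====
-- the module constant CAPSTONE_PROJECTS: (id, name, level, tags); shared by both ports
def pvCAPSTONE : List (Int × String × String × List String) :=
  [ (1, "AI Flashcard Generator", "beginner", ["education", "cli", "llm"]),
    (2, "Mood Journal with AI Insights", "beginner", ["health", "journal", "llm"]),
    (3, "Recipe Generator", "beginner", ["food", "cli", "llm"]),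
    (4, "Daily Standup Bot", "beginner", ["productivity", "cli", "llm"]),
    (5, "Code Comment Generator", "beginner", ["code", "cli", "llm"]),
    (6, "Personal Knowledge Base", "intermediate", ["rag", "search", "web"]),
    (7, "AI Meeting Summarizer", "intermediate", ["productivity", "summarization", "web"]),
    (8, "Smart Email Drafter", "intermediate", ["productivity", "writing", "web"]),
    (9, "Documentation Generator", "intermediate", ["code", "writing", "cli"]),
    (10, "Interview Prep Coach", "intermediate", ["education", "chat", "web"]),
    (11, "Multi-Agent Research Assistant", "advanced", ["agents", "research", "rag"]),
    (12, "AI-Powered Code Reviewer", "advanced", ["code", "agents", "web"]),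
    (13, "Custom Chatbot Platform", "advanced", ["chat", "rag", "web", "deployment"]),
    (14, "AI Content Pipeline", "advanced", ["agents", "writing", "automation"]),
    (15, "Local AI Development Environment", "advanced", ["code", "agents", "tools"]) ]

def select_project (interests : List String) (skill_level : String) : List (List (String × String)) :=
  let level_filter : PySem.Dict String (List String) :=
    ((PySem.Dict.empty.insert "beginner" ["beginner"]).insert
        "intermediate" ["beginner", "intermediate"]).insert
        "advanced" ["beginner", "intermediate", "advanced"]
  let allowed_levels := level_filter.getD skill_level ["beginner"]
  -- scored entries: (name, level, score, reason)
  let scored : List (String × String × Int × String) :=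
    pvCAPSTONE.foldl (fun acc p =>
      if allowed_levels.contains p.2.2.1 then
        let matching_tags := p.2.2.2.filter (fun t => interests.contains t)
        let score : Int := matching_tags.length
        if score > 0 then
          acc ++ [(p.2.1, p.2.2.1, score,
                   "Matches your interests: " ++ PySem.Str.join ", " matching_tags)]
        else acc
      else acc) []
  let sortedScored := PySem.List.sorted scored (fun s => s.2.2.1) true
  (sortedScored.take 3).map (fun s => [("name", s.1), ("level", s.2.1), ("reason", s.2.2.2)])

-- ===== PORT B =====
-- B's helper 'row': score one project into (name, level, score, reason)
def pvRow (interests : List String) (p : Int × String × String × List String) :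
    String × String × Int × String :=
  let tags := p.2.2.2.filter (fun t => interests.contains t)
  (p.2.1, p.2.2.1, (tags.length : Int),
   "Matches your interests: " ++ PySem.Str.join ", " tags)

def select_project_alt (interests : List String) (skill_level : String) : List (List (String × String)) :=
  let allowed : List String :=
    if skill_level == "advanced" then ["beginner", "intermediate", "advanced"]
    else if skill_level == "intermediate" then ["beginner", "intermediate"]
    else ["beginner"]
  let rows0 := (pvCAPSTONE.filter (fun p => allowed.contains p.2.2.1)).map (pvRow interests)
  let rows := rows0.filter (fun r => r.2.2.1 > 0)
  let ordered := ([4, 3, 2, 1] : List Int).flatMap (fun want =>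
    rows.filter (fun r => r.2.2.1 == want))
  (ordered.take 3).map (fun r => [("name", r.1), ("level", r.2.1), ("reason", r.2.2.2)])

-- ===== PRECONDITION & SPEC =====
def Spec_select_project (interests : List String) (skill_level : String) (out : List (List (String × String))) : Prop := out = select_project_alt interests skill_level
instance (interests : List String) (skill_level : String) (out : List (List (String × String))) : Decidable (Spec_select_project interests skill_level out) := by unfold Spec_select_project; infer_instance

-- ===== CLAIM (what is proved, stated in full; the proofs are below) =====
def Claim_equal_select_project : Prop := ∀ (interests : List String) (skill_level : String), Dom_select_project interests skill_level → Spec_select_project interests skill_level (select_project interests skill_level)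

-- ===== LEMMAS AND PROOFS =====

-- A's dict lookup and B's if/elif chain compute the same allowed-levels list
theorem pv_allowed_eq (s : String) :
    (((PySem.Dict.empty.insert "beginner" ["beginner"]).insert
        "intermediate" ["beginner", "intermediate"]).insert
        "advanced" ["beginner", "intermediate", "advanced"]).getD s ["beginner"]
    = (if s == "advanced" then ["beginner", "intermediate", "advanced"]
       else if s == "intermediate" then ["beginner", "intermediate"]
       else (["beginner"] : List String)) := by
  by_cases h1 : s = "beginner"
  · subst h1; decide
  by_cases h2 : s = "intermediate"
  · subst h2; decide
  by_cases h3 : s = "advanced"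
  · subst h3; decide
  have b1 : ("beginner" == s) = false := by rw [beq_eq_false_iff_ne]; exact fun e => h1 e.symm
  have b2 : ("intermediate" == s) = false := by rw [beq_eq_false_iff_ne]; exact fun e => h2 e.symm
  have b3 : ("advanced" == s) = false := by rw [beq_eq_false_iff_ne]; exact fun e => h3 e.symm
  have c2 : (s == "intermediate") = false := by rw [beq_eq_false_iff_ne]; exact h2
  have c3 : (s == "advanced") = false := by rw [beq_eq_false_iff_ne]; exact h3
  simp [PySem.Dict.getD, PySem.Dict.get?, PySem.Dict.insert, PySem.Dict.empty, List.find?,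
    b1, b2, b3, c2, c3]

-- A's append-accumulator loop equals B's filter→map→filter pipeline
theorem pv_rows_eq (interests allowed : List String)
    (l : List (Int × String × String × List String)) (acc : List (String × String × Int × String)) :
    l.foldl (fun acc p =>
      if allowed.contains p.2.2.1 then
        let matching_tags := p.2.2.2.filter (fun t => interests.contains t)
        let score : Int := matching_tags.length
        if score > 0 then
          acc ++ [(p.2.1, p.2.2.1, score,
                   "Matches your interests: " ++ PySem.Str.join ", " matching_tags)]
        else acc
      else acc) acc
    = acc ++ ((l.filter (fun p => allowed.contains p.2.2.1)).map (pvRow interests)).filter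
        (fun r => r.2.2.1 > 0) := by
  induction l generalizing acc with
  | nil => simp
  | cons p l ih =>
    simp only [List.foldl_cons]
    by_cases h1 : allowed.contains p.2.2.1 = true
    · by_cases h2 : ((p.2.2.2.filter (fun t => interests.contains t)).length : Int) > 0
      · have hd : (decide ((pvRow interests p).2.2.1 > 0)) = true := by
          simp only [pvRow]; simpa using h2
        simp only [List.filter_cons, List.map_cons, if_pos h1, if_pos h2, if_pos hd]
        rw [ih]
        simp only [List.append_assoc, List.singleton_append]
        rfl
      · have hd : ¬ ((decide ((pvRow interests p).2.2.1 > 0)) = true) := by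
          simp only [pvRow]; simpa using h2
        simp only [List.filter_cons, List.map_cons, if_pos h1, if_neg h2, if_neg hd]
        exact ih acc
    · simp only [List.filter_cons, if_neg h1]
      exact ih acc

-- insertBy passes over a block it does not go before
theorem pv_insertBy_append {α : Type} (before : α → α → Bool) (x : α) (ys zs : List α)
    (h : ∀ y ∈ ys, before x y = false) :
    PySem.List.insertBy before x (ys ++ zs) = ys ++ PySem.List.insertBy before x zs := by
  induction ys with
  | nil => simp
  | cons y ys ih =>
    simp only [List.cons_append, PySem.List.insertBy, h y (by simp)]
    simp only [Bool.false_eq_true, if_false, List.cons.injEq, true_and]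
    exact ih (fun y hy => h y (by simp [hy]))

-- insertBy puts x in front of a block it goes before every element of
theorem pv_insertBy_front {α : Type} (before : α → α → Bool) (x : α) (zs : List α)
    (h : ∀ y ∈ zs, before x y = true) :
    PySem.List.insertBy before x zs = x :: zs := by
  cases zs with
  | nil => rfl
  | cons z zs => simp [PySem.List.insertBy, h z (by simp)]

-- Python's stable descending sort of a list whose keys all lie in {1,2,3,4}
-- is the concatenation of the score buckets, from 4 down to 1.
theorem pv_sorted_buckets {α : Type} (l : List α) (key : α → Int)
    (h : ∀ x ∈ l, key x = 1 ∨ key x = 2 ∨ key x = 3 ∨ key x = 4) :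
    PySem.List.sorted l key true =
      l.filter (fun x => key x == 4) ++ l.filter (fun x => key x == 3) ++
      l.filter (fun x => key x == 2) ++ l.filter (fun x => key x == 1) := by
  rw [PySem.List.sorted_rev_eq_foldl_insertBy]
  induction l using List.reverseRecOn with
  | nil => rfl
  | append_singleton l x ih =>
    have hl : ∀ y ∈ l, key y = 1 ∨ key y = 2 ∨ key y = 3 ∨ key y = 4 :=
      fun y hy => h y (by simp [hy])
    have hx := h x (by simp)
    rw [List.foldl_append, List.foldl_cons, List.foldl_nil, ih hl]
    have hf4 : ∀ y ∈ l.filter (fun x => key x == 4), key y = 4 := by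
      intro y hy; simpa using (List.of_mem_filter hy)
    have hf3 : ∀ y ∈ l.filter (fun x => key x == 3), key y = 3 := by
      intro y hy; simpa using (List.of_mem_filter hy)
    have hf2 : ∀ y ∈ l.filter (fun x => key x == 2), key y = 2 := by
      intro y hy; simpa using (List.of_mem_filter hy)
    have hf1 : ∀ y ∈ l.filter (fun x => key x == 1), key y = 1 := by
      intro y hy; simpa using (List.of_mem_filter hy)
    rcases hx with hk | hk | hk | hk <;>
      simp only [List.filter_append, List.filter_cons, List.filter_nil, hk] <;> norm_num
    · -- key x = 1 : goes after every bucket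
      rw [pv_insertBy_append _ _ _ _ (fun y hy => by simp [hf4 y hy, hk]),
        pv_insertBy_append _ _ _ _ (fun y hy => by simp [hf3 y hy, hk]),
        pv_insertBy_append _ _ _ _ (fun y hy => by simp [hf2 y hy, hk]),
        PySem.List.insertBy_of_forall_not_before _ _ _ (fun y hy => by simp [hf1 y hy, hk])]
    · -- key x = 2
      rw [pv_insertBy_append _ _ _ _ (fun y hy => by simp [hf4 y hy, hk]),
        pv_insertBy_append _ _ _ _ (fun y hy => by simp [hf3 y hy, hk]),
        pv_insertBy_append _ _ _ _ (fun y hy => by simp [hf2 y hy, hk]),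
        pv_insertBy_front _ _ _ (fun y hy => by simp [hf1 y hy, hk])]
    · -- key x = 3
      rw [pv_insertBy_append _ _ _ _ (fun y hy => by simp [hf4 y hy, hk]),
        pv_insertBy_append _ _ _ _ (fun y hy => by simp [hf3 y hy, hk]),
        pv_insertBy_front _ _ _ (fun y hy => by
          rcases List.mem_append.1 hy with hy | hy
          · simp [hf2 y hy, hk]
          · simp [hf1 y hy, hk])]
    · -- key x = 4 : stays in the first bucket, at its end
      rw [pv_insertBy_append _ _ _ _ (fun y hy => by simp [hf4 y hy, hk]),
        pv_insertBy_front _ _ _ (fun y hy => by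
          rcases List.mem_append.1 hy with hy | hy
          · simp [hf3 y hy, hk]
          · rcases List.mem_append.1 hy with hy | hy
            · simp [hf2 y hy, hk]
            · simp [hf1 y hy, hk])]

theorem select_project_spec_aux (interests : List String) (skill_level : String) :
    select_project interests skill_level = select_project_alt interests skill_level := by
  simp only [select_project, select_project_alt]
  rw [pv_allowed_eq]
  set allowed : List String :=
    (if skill_level == "advanced" then ["beginner", "intermediate", "advanced"]
     else if skill_level == "intermediate" then ["beginner", "intermediate"]
     else ["beginner"]) with hallowed
  rw [pv_rows_eq interests allowed pvCAPSTONE []]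
  simp only [List.nil_append]
  set rows := ((pvCAPSTONE.filter (fun p => allowed.contains p.2.2.1)).map (pvRow interests)).filter
      (fun r => r.2.2.1 > 0) with hrows
  -- every kept score lies in {1,2,3,4}
  have hscore : ∀ x ∈ rows, x.2.2.1 = 1 ∨ x.2.2.1 = 2 ∨ x.2.2.1 = 3 ∨ x.2.2.1 = 4 := by
    intro x hx
    have hx' := List.of_mem_filter hx
    have hmem := List.mem_of_mem_filter hx
    rcases List.mem_map.1 hmem with ⟨p, hp, hpx⟩
    have hp' := List.mem_of_mem_filter hp
    have hlen4 : p.2.2.2.length ≤ 4 := by fin_cases hp' <;> decide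
    have hle : (p.2.2.2.filter (fun t => interests.contains t)).length ≤ 4 :=
      le_trans (List.length_filter_le _ _) hlen4
    have hkey : x.2.2.1 = ((p.2.2.2.filter (fun t => interests.contains t)).length : Int) := by
      rw [← hpx]; rfl
    have hpos : x.2.2.1 > 0 := by simpa using hx'
    rw [hkey] at hpos ⊢
    omega
  rw [pv_sorted_buckets rows _ hscore]
  simp only [List.flatMap_cons, List.flatMap_nil, List.append_nil, List.append_assoc]

-- ===== VERDICT (by name: the statement is the Claim_ definition above) =====
theorem select_project_spec : Claim_equal_select_project := by
  intro interests skill_level _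
  unfold Spec_select_project
  exact select_project_spec_aux interests skill_level
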